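-- pv_equiv track=rewrite | github.com/antonpictures/ANTON-SIFTA | System/ide_trace_defensive.py | _skip_glue
-- ===== SOURCE A (Python) =====
-- def _skip_glue(s: str, idx: int) -> int:
--     while idx < len(s) and s[idx] in " \t\r":
--         idx += 1
--     if idx < len(s) and s[idx] == "\n":
--         idx += 1
--         while idx < len(s) and s[idx] in " \t\r":
--             idx += 1
--     elif idx + 2 <= len(s) and s[idx] == "\\" and s[idx + 1] == "n":
--         idx += 2
--         while idx < len(s) and s[idx] in " \t\r":
--             idx += 1
--     return idx
-- ===== SOURCE B (Python) =====
-- def _skip_glue(s: str, idx: int) -> int: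
--     rest = s[idx:]
--     i = len(rest) - len(rest.lstrip(" \t\r"))
--     if rest[i:i+1] == "\n":
--         i += 1
--     elif rest[i:i+2] == "\\n":
--         i += 2
--     else:
--         return idx + i
--     tail = rest[i:]
--     return idx + i + len(tail) - len(tail.lstrip(" \t\r"))
-- ===== Notes on version B (the rewrite author's own statement) =====
-- stated objective: idiomatic
-- what changed: Replaces the three manual index-bounded while loops and if/elif index checks by slicing and lstrip-length arithmetic: compute the whitespace run as len(rest)-len(rest.lstrip(' \t\r')), test the optional newline glue with one-/two-character slices, and do the same once more for the tail.
-- outside the precondition, e.g. on _skip_glue(' ', -1): A returns 1, B returns 0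
import Mathlib
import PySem

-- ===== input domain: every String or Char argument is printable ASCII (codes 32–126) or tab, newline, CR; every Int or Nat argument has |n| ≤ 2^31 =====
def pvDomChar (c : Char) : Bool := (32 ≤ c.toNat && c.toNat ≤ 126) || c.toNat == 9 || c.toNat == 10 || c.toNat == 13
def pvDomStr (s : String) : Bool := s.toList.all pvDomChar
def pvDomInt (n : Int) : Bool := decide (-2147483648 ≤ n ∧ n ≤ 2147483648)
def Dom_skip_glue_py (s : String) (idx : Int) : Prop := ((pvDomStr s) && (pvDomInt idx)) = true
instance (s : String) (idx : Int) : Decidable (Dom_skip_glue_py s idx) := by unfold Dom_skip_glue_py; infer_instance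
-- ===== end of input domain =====

-- ===== PORT A =====
-- B replaces A's three index-bounded while loops by slicing and lstrip-length arithmetic (idiomatic, same cost).
-- (Pre_ restricts to nonnegative scan positions; see its comment.)

-- the character set " \t\r" of both Pythons
def pvWS (c : Char) : Bool := c == ' ' || c == '\t' || c == '\r'

-- while idx < len(s) and s[idx] in " \t\r": idx += 1
def pvSkipWS (cs : List Char) (idx : Int) : Int :=
  if h : idx < (cs.length : Int) then
    match PySem.List.pyGet? cs idx with
    | some c => if pvWS c then pvSkipWS cs (idx + 1) else idx
    | none => idx
  else idx
termination_by (cs.length - idx).toNat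
decreasing_by omega

def skip_glue_py (s : String) (idx : Int) : Int :=
  let cs := s.toList
  let i1 := pvSkipWS cs idx
  if i1 < (cs.length : Int) ∧ PySem.List.pyGet? cs i1 = some '\n' then
    pvSkipWS cs (i1 + 1)
  else if i1 + 2 ≤ (cs.length : Int) ∧ PySem.List.pyGet? cs i1 = some '\\' ∧
      PySem.List.pyGet? cs (i1 + 1) = some 'n' then
    pvSkipWS cs (i1 + 2)
  else i1

-- ===== PORT B =====
-- Python's rest.lstrip(" \t\r") is ported by hand as dropWhile pvWS (exact: lstrip with an
-- explicit char set removes exactly the longest leading run of characters from that set).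
def skip_glue_py_alt (s : String) (idx : Int) : Int :=
  let rest := PySem.List.slice s.toList (some idx) none
  let i : Int := (rest.length : Int) - ((rest.dropWhile pvWS).length : Int)
  if PySem.List.slice rest (some i) (some (i + 1)) = ['\n'] then
    let i := i + 1
    let tail := PySem.List.slice rest (some i) none
    idx + i + (tail.length : Int) - ((tail.dropWhile pvWS).length : Int)
  else if PySem.List.slice rest (some i) (some (i + 2)) = ['\\', 'n'] then
    let i := i + 2
    let tail := PySem.List.slice rest (some i) none
    idx + i + (tail.length : Int) - ((tail.dropWhile pvWS).length : Int)
  else idx + i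

-- ===== PRECONDITION & SPEC =====
-- Pre_ excludes negative idx: a scan position is naturally nonnegative; for idx < -len(s) A raises
-- IndexError, and for -len(s) <= idx < 0 A reads through Python's negative-index wraparound, an
-- accidental corner this helper's callers never reach, so B does the natural clamped-slice thing there.
def Pre_skip_glue_py (s : String) (idx : Int) : Prop := 0 ≤ idx
instance (s : String) (idx : Int) : Decidable (Pre_skip_glue_py s idx) := by
  unfold Pre_skip_glue_py; infer_instance
def pvWitness_skip_glue_py : String × Int := (" \n x", 0)
def Spec_skip_glue_py (s : String) (idx : Int) (out : Int) : Prop := out = skip_glue_py_alt s idx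
instance (s : String) (idx : Int) (out : Int) : Decidable (Spec_skip_glue_py s idx out) := by unfold Spec_skip_glue_py; infer_instance

-- ===== CLAIM (what is proved, stated in full; the proofs are below) =====
def Claim_equal_skip_glue_py : Prop := ∀ (s : String) (idx : Int), Dom_skip_glue_py s idx → Pre_skip_glue_py s idx → Spec_skip_glue_py s idx (skip_glue_py s idx)

-- ===== LEMMAS AND PROOFS =====

theorem pvLen_sub (l : List Char) :
    (l.length : Int) - ((l.dropWhile pvWS).length : Int) = ((l.takeWhile pvWS).length : Int) := by
  have h := congrArg List.length (List.takeWhile_append_dropWhile (p := pvWS) (l := l))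
  simp only [List.length_append] at h
  omega

theorem pvSkipWS_stop (cs : List Char) (j : Nat) (hj : cs.length ≤ j) :
    pvSkipWS cs (j : Int) = (j : Int) + (((cs.drop j).takeWhile pvWS).length : Int) := by
  rw [pvSkipWS, dif_neg (by push_cast; omega)]
  simp [List.drop_eq_nil_of_le hj]

theorem pvSkipWS_eq_aux (cs : List Char) : ∀ (n j : Nat), cs.length - j ≤ n →
    pvSkipWS cs (j : Int) = (j : Int) + (((cs.drop j).takeWhile pvWS).length : Int) := by
  intro n
  induction n with
  | zero =>
    intro j hle
    exact pvSkipWS_stop cs j (by omega)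
  | succ n ih =>
    intro j hle
    by_cases hj : j < cs.length
    · rw [pvSkipWS, dif_pos (by exact_mod_cast hj)]
      have hget : PySem.List.pyGet? cs ((j : Nat) : Int) = cs[j]? := by
        simp [PySem.List.pyGet?_natCast]
      rw [hget, List.getElem?_eq_getElem hj]
      have hdrop : cs.drop j = cs[j] :: cs.drop (j + 1) := List.drop_eq_getElem_cons hj
      rw [hdrop, List.takeWhile_cons]
      by_cases hw : pvWS cs[j]
      · have hrec := ih (j + 1) (by omega)
        push_cast at hrec ⊢
        simp [hw, hrec]
        omega
      · simp [hw]
    · exact pvSkipWS_stop cs j (by omega)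

theorem pvSkipWS_eq (cs : List Char) (j : Nat) :
    pvSkipWS cs (j : Int) = (j : Int) + (((cs.drop j).takeWhile pvWS).length : Int) :=
  pvSkipWS_eq_aux cs (cs.length - j) j le_rfl

theorem pvTake1 (l : List Char) (t : Nat) (c : Char) :
    ((l.drop t).take 1 = [c]) ↔ l[t]? = some c := by
  cases h : l[t]? with
  | none =>
    have hle : l.length ≤ t := by
      by_contra hlt
      simp [List.getElem?_eq_getElem (by omega : t < l.length)] at h
    simp [List.drop_eq_nil_of_le hle]
  | some a =>
    have ht : t < l.length := by
      by_contra hge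
      simp [List.getElem?_eq_none_iff.mpr (by omega : l.length ≤ t)] at h
    have ha : l[t] = a := by simpa [List.getElem?_eq_getElem ht] using h
    rw [List.drop_eq_getElem_cons ht]
    simp [ha]

theorem pvTake2 (l : List Char) (t : Nat) (c d : Char) :
    ((l.drop t).take 2 = [c, d]) ↔ (l[t]? = some c ∧ l[t+1]? = some d) := by
  cases h : l[t]? with
  | none =>
    have hle : l.length ≤ t := by
      by_contra hlt
      simp [List.getElem?_eq_getElem (by omega : t < l.length)] at h
    constructor
    · intro hh; simp [List.drop_eq_nil_of_le hle] at hh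
    · intro hh; simp at hh
  | some a =>
    have ht : t < l.length := by
      by_contra hge
      simp [List.getElem?_eq_none_iff.mpr (by omega : l.length ≤ t)] at h
    have ha : l[t] = a := by simpa [List.getElem?_eq_getElem ht] using h
    rw [List.drop_eq_getElem_cons ht]
    have h1 := pvTake1 l (t + 1) d
    constructor
    · intro hh
      simp only [List.take_succ_cons, List.cons.injEq] at hh
      exact ⟨by rw [← ha, hh.1], h1.mp hh.2⟩
    · rintro ⟨hc, hd⟩
      have hac : a = c := by injection hc
      simp [List.take_succ_cons, ha, hac, h1.mpr hd]

-- ===== VERDICT (by name: the statement is the Claim_ definition above) =====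
theorem pvDropAt (l : List Char) (t : Nat) (c : Char) (h : l[t]? = some c) :
    t < l.length := by
  by_contra hge
  simp [List.getElem?_eq_none_iff.mpr (by omega : l.length ≤ t)] at h

theorem skip_glue_py_spec : Claim_equal_skip_glue_py := by
  intro s idx hdom hpre
  obtain ⟨j, rfl⟩ : ∃ jn : Nat, idx = (jn : Int) := ⟨idx.toNat, (Int.toNat_of_nonneg hpre).symm⟩
  unfold Spec_skip_glue_py skip_glue_py skip_glue_py_alt
  simp only [PySem.List.slice_from_natCast]
  set cs := s.toList with hcs
  set r := cs.drop j with hr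
  set t := (r.takeWhile pvWS).length with htdef
  have hlen : r.length = cs.length - j := by simp [hr]
  have htle : t ≤ r.length := by
    have h := congrArg List.length (List.takeWhile_append_dropWhile (p := pvWS) (l := r))
    simp only [List.length_append] at h
    omega
  -- A's whitespace loop = j + t
  have hA0 : pvSkipWS cs (j : Int) = (j : Int) + (t : Int) := by
    rw [pvSkipWS_eq]
  -- B's i = t
  have hB0 : (r.length : Int) - ((r.dropWhile pvWS).length : Int) = (t : Int) := pvLen_sub r
  rw [hA0, hB0]
  -- index bridges
  have hcast1 : (j : Int) + (t : Int) = ((j + t : Nat) : Int) := by push_cast; ring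
  have hgetA : ∀ k : Nat, PySem.List.pyGet? cs ((j + k : Nat) : Int) = r[k]? := by
    intro k
    rw [PySem.List.pyGet?_natCast, hr, List.getElem?_drop]
  -- condition 1
  have hc1 : ((j : Int) + (t : Int) < (cs.length : Int) ∧
      PySem.List.pyGet? cs ((j : Int) + (t : Int)) = some '\n') ↔ r[t]? = some '\n' := by
    rw [hcast1, hgetA t]
    constructor
    · exact fun h => h.2
    · intro h
      refine ⟨?_, h⟩
      have := pvDropAt r t _ h
      push_cast
      omega
  have he1 : (t : Int) + 1 = ((t + 1 : Nat) : Int) := by push_cast; ring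
  have he2 : (t : Int) + 2 = ((t + 2 : Nat) : Int) := by push_cast; ring
  have hb1 : PySem.List.slice r (some (t : Int)) (some ((t : Int) + 1)) = (r.drop t).take 1 := by
    rw [he1, PySem.List.slice_natCast]
    congr 1
    omega
  have hb2 : PySem.List.slice r (some (t : Int)) (some ((t : Int) + 2)) = (r.drop t).take 2 := by
    rw [he2, PySem.List.slice_natCast]
    congr 1
    omega
  -- condition 2
  have hc2 : ((j : Int) + (t : Int) + 2 ≤ (cs.length : Int) ∧
      PySem.List.pyGet? cs ((j : Int) + (t : Int)) = some '\\' ∧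
      PySem.List.pyGet? cs ((j : Int) + (t : Int) + 1) = some 'n') ↔
      (r[t]? = some '\\' ∧ r[t + 1]? = some 'n') := by
    have hcast2 : ((j + t : Nat) : Int) + 1 = ((j + (t + 1) : Nat) : Int) := by push_cast; ring
    rw [hcast1, hcast2, hgetA t, hgetA (t + 1)]
    constructor
    · exact fun h => ⟨h.2.1, h.2.2⟩
    · intro h
      refine ⟨?_, h.1, h.2⟩
      have := pvDropAt r (t + 1) _ h.2
      push_cast
      omega
  -- branch results
  have hdrop1 : cs.drop (j + (t + 1)) = r.drop (t + 1) := by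
    rw [hr, List.drop_drop]
  have hdrop2 : cs.drop (j + (t + 2)) = r.drop (t + 2) := by
    rw [hr, List.drop_drop]
  have hres1 : pvSkipWS cs ((j : Int) + (t : Int) + 1) =
      (j : Int) + ((t : Int) + 1) + ((r.drop (t + 1)).length : Int) -
        (((r.drop (t + 1)).dropWhile pvWS).length : Int) := by
    have : (j : Int) + (t : Int) + 1 = ((j + (t + 1) : Nat) : Int) := by push_cast; ring
    rw [this, pvSkipWS_eq, hdrop1]
    have hx := pvLen_sub (r.drop (t + 1))
    push_cast at hx ⊢
    omega
  have hres2 : pvSkipWS cs ((j : Int) + (t : Int) + 2) =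
      (j : Int) + ((t : Int) + 2) + ((r.drop (t + 2)).length : Int) -
        (((r.drop (t + 2)).dropWhile pvWS).length : Int) := by
    have : (j : Int) + (t : Int) + 2 = ((j + (t + 2) : Nat) : Int) := by push_cast; ring
    rw [this, pvSkipWS_eq, hdrop2]
    have hx := pvLen_sub (r.drop (t + 2))
    push_cast at hx ⊢
    omega
  have htail1 : PySem.List.slice r (some ((t : Int) + 1)) none = r.drop (t + 1) := by
    rw [he1, PySem.List.slice_from_natCast]
  have htail2 : PySem.List.slice r (some ((t : Int) + 2)) none = r.drop (t + 2) := by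
    rw [he2, PySem.List.slice_from_natCast]
  rw [hb1, hb2, htail1, htail2]
  by_cases h1 : r[t]? = some '\n'
  · rw [if_pos (hc1.mpr h1), if_pos ((pvTake1 r t '\n').mpr h1), hres1]
  · rw [if_neg (fun hh => h1 (hc1.mp hh)),
        if_neg (fun hh => h1 ((pvTake1 r t '\n').mp hh))]
    by_cases h2 : r[t]? = some '\\' ∧ r[t + 1]? = some 'n'
    · rw [if_pos (hc2.mpr h2), if_pos ((pvTake2 r t '\\' 'n').mpr h2), hres2]
    · rw [if_neg (fun hh => h2 (hc2.mp hh)),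
          if_neg (fun hh => h2 ((pvTake2 r t '\\' 'n').mp hh))]
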